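-- pv_equiv track=rewrite | github.com/BrunaMarques/Classificador-Resposta-Argumentativa | classificador.py | abstracts_to_sentences
-- ===== SOURCE A (Python) =====
-- def abstracts_to_sentences(abstracts, labels):
--     ret = []
--     ret_prev = []
--     ret_next = []
--     ret_labels = []
--     ret_pos = []
--
--     for i, (sentences_labels, sentences) in enumerate(zip(labels, abstracts)):
--         for j, (label, sentence) in enumerate(zip(sentences_labels, sentences)):
--             ret.append(sentence)
--             ret_pos.append(j)
--             ret_labels.append(label)
--
--             if j - 1 >= 0:
--                 ret_prev.append(sentences[j - 1])
--             else:
--                 ret_prev.append("")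
--
--             if j + 1 < len(sentences):
--                 ret_next.append(sentences[j + 1])
--             else:
--                 ret_next.append("")
--
--     return ret, ret_prev, ret_next, ret_pos, ret_labels
-- ===== SOURCE B (Python) =====
-- def abstracts_to_sentences(abstracts, labels):
--     ret = []
--     ret_prev = []
--     ret_next = []
--     ret_labels = []
--     ret_pos = []
--
--     for sentences_labels, sentences in zip(labels, abstracts):
--         k = min(len(sentences_labels), len(sentences))
--         ret.extend(sentences[:k])
--         ret_prev.extend(([""] + sentences[:-1])[:k])
--         ret_next.extend((sentences[1:] + [""])[:k])
--         ret_pos.extend(range(k))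
--         ret_labels.extend(sentences_labels[:k])
--
--     return ret, ret_prev, ret_next, ret_pos, ret_labels
-- ===== Notes on version B (the rewrite author's own statement) =====
-- stated objective: simpler
-- what changed: Replaces the per-sentence inner loop with its j-1/j+1 bound-check branches by per-abstract padded shifted context lists ([''] + sentences[:-1], sentences[1:] + ['']) sliced to k = min(len(labels_i), len(sentences_i)) and extended in bulk.
import Mathlib
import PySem

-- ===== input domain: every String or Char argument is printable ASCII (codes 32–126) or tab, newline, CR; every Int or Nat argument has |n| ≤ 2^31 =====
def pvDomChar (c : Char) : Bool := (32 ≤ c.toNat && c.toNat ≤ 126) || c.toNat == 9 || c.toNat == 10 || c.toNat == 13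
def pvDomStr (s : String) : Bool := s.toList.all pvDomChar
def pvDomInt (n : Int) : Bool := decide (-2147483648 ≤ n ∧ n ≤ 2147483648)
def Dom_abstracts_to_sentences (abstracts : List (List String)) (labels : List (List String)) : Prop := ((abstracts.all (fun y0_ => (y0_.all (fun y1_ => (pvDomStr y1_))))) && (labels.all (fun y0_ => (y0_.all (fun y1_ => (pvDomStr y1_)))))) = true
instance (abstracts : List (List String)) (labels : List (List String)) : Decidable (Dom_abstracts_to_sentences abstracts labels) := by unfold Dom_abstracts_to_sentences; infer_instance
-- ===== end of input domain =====

-- B replaces the per-sentence bound-check branches by per-abstract padded shifted context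
-- lists sliced to k = min(#labels, #sentences) and extended in bulk (objective: simpler).


-- ===== PORT A =====
-- inner loop: for j, (label, sentence) in enumerate(zip(sentences_labels, sentences))
def pvInnerA (sentences : List String) :
    List (String × String) → Nat →
    (List String × List String × List String × List Int × List String) →
    (List String × List String × List String × List Int × List String)
  | [], _, st => st
  | (label, sentence) :: rest, j, st =>
    let ret := st.1 ++ [sentence]
    let ret_pos := st.2.2.2.1 ++ [(j : Int)]
    let ret_labels := st.2.2.2.2 ++ [label]
    let ret_prev :=
      if (j : Int) - 1 ≥ 0 then st.2.1 ++ [PySem.List.pyGetD sentences ((j : Int) - 1) ""]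
      else st.2.1 ++ [""]
    let ret_next :=
      if (j : Int) + 1 < (sentences.length : Int) then
        st.2.2.1 ++ [PySem.List.pyGetD sentences ((j : Int) + 1) ""]
      else st.2.2.1 ++ [""]
    pvInnerA sentences rest (j + 1) (ret, ret_prev, ret_next, ret_pos, ret_labels)

-- outer loop: for i, (sentences_labels, sentences) in enumerate(zip(labels, abstracts))  (i unused)
def pvOuterA :
    List (List String × List String) →
    (List String × List String × List String × List Int × List String) →
    (List String × List String × List String × List Int × List String)
  | [], st => st
  | (sentences_labels, sentences) :: rest, st =>
    pvOuterA rest (pvInnerA sentences (sentences_labels.zip sentences) 0 st)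

def abstracts_to_sentences (abstracts : List (List String)) (labels : List (List String)) : List String × List String × List String × List Int × List String :=
  pvOuterA (labels.zip abstracts) ([], [], [], [], [])

-- ===== PORT B =====
def abstracts_to_sentences_alt (abstracts : List (List String)) (labels : List (List String)) : List String × List String × List String × List Int × List String :=
  (labels.zip abstracts).foldl
    (fun st p =>
      let ls := p.1
      let ss := p.2
      let k := min ls.length ss.length
      (st.1 ++ ss.take k,
       st.2.1 ++ ("" :: ss.dropLast).take k,
       st.2.2.1 ++ (ss.drop 1 ++ [""]).take k,
       st.2.2.2.1 ++ (List.range k).map (fun j => (j : Int)),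
       st.2.2.2.2 ++ ls.take k))
    ([], [], [], [], [])

-- ===== PRECONDITION & SPEC =====
def Spec_abstracts_to_sentences (abstracts : List (List String)) (labels : List (List String)) (out : List String × List String × List String × List Int × List String) : Prop := out = abstracts_to_sentences_alt abstracts labels
instance (abstracts : List (List String)) (labels : List (List String)) (out : List String × List String × List String × List Int × List String) : Decidable (Spec_abstracts_to_sentences abstracts labels out) := by unfold Spec_abstracts_to_sentences; infer_instance

-- ===== CLAIM (what is proved, stated in full; the proofs are below) =====
def Claim_equal_abstracts_to_sentences : Prop := ∀ (abstracts : List (List String)) (labels : List (List String)), Dom_abstracts_to_sentences abstracts labels → Spec_abstracts_to_sentences abstracts labels (abstracts_to_sentences abstracts labels)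

-- ===== LEMMAS AND PROOFS =====

-- A's inner loop, started at position j, appends exactly the j-th tails of B's per-abstract slices.
lemma pvInnerA_eq (ls ss : List String) :
    ∀ (n j : Nat) (st : List String × List String × List String × List Int × List String),
      n = min ls.length ss.length - j →
      pvInnerA ss ((ls.zip ss).drop j) j st =
        (st.1 ++ ((ss.take (min ls.length ss.length)).drop j),
         st.2.1 ++ ((("" :: ss.dropLast).take (min ls.length ss.length)).drop j),
         st.2.2.1 ++ (((ss.tail ++ [""]).take (min ls.length ss.length)).drop j),
         st.2.2.2.1 ++ (List.range' j (min ls.length ss.length - j)).map (fun t => (t : Int)),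
         st.2.2.2.2 ++ ((ls.take (min ls.length ss.length)).drop j)) := by
  intro n
  induction n with
  | zero =>
    intro j st h
    have hk : min ls.length ss.length ≤ j := by omega
    have hz : ((ls.zip ss).drop j) = [] := by
      apply List.drop_eq_nil_of_le
      simpa [List.length_zip] using hk
    rw [hz]
    have d1 : (ss.take (min ls.length ss.length)).drop j = [] :=
      List.drop_eq_nil_of_le (le_trans (List.length_take_le _ _) hk)
    have d2 : (("" :: ss.dropLast).take (min ls.length ss.length)).drop j = [] :=
      List.drop_eq_nil_of_le (le_trans (List.length_take_le _ _) hk)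
    have d3 : ((ss.tail ++ [""]).take (min ls.length ss.length)).drop j = [] :=
      List.drop_eq_nil_of_le (le_trans (List.length_take_le _ _) hk)
    have d4 : (ls.take (min ls.length ss.length)).drop j = [] :=
      List.drop_eq_nil_of_le (le_trans (List.length_take_le _ _) hk)
    have hkj : min ls.length ss.length - j = 0 := by omega
    simp [pvInnerA, d1, d2, d3, d4, hkj]
  | succ n ih =>
    intro j st h
    have hj : j < min ls.length ss.length := by omega
    have hjz : j < (ls.zip ss).length := by simpa [List.length_zip] using hj
    have hjl : j < ls.length := by omega
    have hjs : j < ss.length := by omega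
    rw [List.drop_eq_getElem_cons hjz, List.getElem_zip]
    show pvInnerA ss ((ls[j], ss[j]) :: (ls.zip ss).drop (j+1)) j st = _
    rw [pvInnerA]
    rw [ih (j+1) _ (by omega)]
    have hkd : min ls.length ss.length - j = (min ls.length ss.length - (j+1)) + 1 := by omega
    refine Prod.ext ?_ (Prod.ext ?_ (Prod.ext ?_ (Prod.ext ?_ ?_)))
    · -- ret
      have step : (ss.take (min ls.length ss.length)).drop j
          = ss[j] :: (ss.take (min ls.length ss.length)).drop (j+1) := by
        rw [List.drop_eq_getElem_cons (by simpa [List.length_take] using hj)]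
        simp [List.getElem_take]
      simp [step]
    · -- ret_prev
      have hlen : j < (("" :: ss.dropLast).take (min ls.length ss.length)).length := by
        simp [List.length_take]
        omega
      have hlen' : j < ("" :: ss.dropLast).length := by
        simp
        omega
      have step : (("" :: ss.dropLast).take (min ls.length ss.length)).drop j
          = ("" :: ss.dropLast)[j]'hlen'
            :: (("" :: ss.dropLast).take (min ls.length ss.length)).drop (j+1) := by
        rw [List.drop_eq_getElem_cons hlen]
        simp [List.getElem_take]
      rw [step]
      rcases Nat.eq_zero_or_pos j with hj0 | hj0
      · subst hj0
        simp
      · rw [if_pos (show (j : Int) - 1 ≥ 0 by omega)]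
        have hcast : (j : Int) - 1 = ((j - 1 : Nat) : Int) := by omega
        have hidx : j - 1 < ss.length := by omega
        have hg : PySem.List.pyGetD ss ((j : Int) - 1) "" = ss[j - 1] := by
          rw [hcast, PySem.List.pyGetD_natCast]
          exact List.getD_eq_getElem _ _ hidx
        have hel : ("" :: ss.dropLast)[j]'hlen' = ss[j - 1] := by
          rcases j with _ | j'
          · omega
          · simp [List.getElem_dropLast]
        simp [hg, hel]
    · -- ret_next
      have hlen2 : j < ((ss.tail ++ [""]).take (min ls.length ss.length)).length := by
        simp [List.length_take, List.length_tail]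
        omega
      have hlen2' : j < (ss.tail ++ [""]).length := by
        simp [List.length_tail]
        omega
      have step : ((ss.tail ++ [""]).take (min ls.length ss.length)).drop j
          = (ss.tail ++ [""])[j]'hlen2'
            :: ((ss.tail ++ [""]).take (min ls.length ss.length)).drop (j+1) := by
        rw [List.drop_eq_getElem_cons hlen2]
        simp [List.getElem_take]
      rw [step]
      by_cases hnext : (j : Int) + 1 < (ss.length : Int)
      · rw [if_pos hnext]
        have hjn : j + 1 < ss.length := by omega
        have hg : PySem.List.pyGetD ss ((j : Int) + 1) "" = ss[j + 1] := by
          have hcast : (j : Int) + 1 = ((j + 1 : Nat) : Int) := by omega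
          rw [hcast, PySem.List.pyGetD_natCast]
          exact List.getD_eq_getElem _ _ hjn
        have hjt : j < ss.tail.length := by
          simp [List.length_tail]
          omega
        have hel : (ss.tail ++ [""])[j]'hlen2' = ss[j + 1] := by
          rw [List.getElem_append_left hjt]
          simp [List.getElem_tail]
        simp [hg, hel]
      · rw [if_neg hnext]
        have hge : ss.tail.length ≤ j := by
          simp [List.length_tail]
          omega
        have hel : (ss.tail ++ [""])[j]'hlen2' = "" := by
          rw [List.getElem_append_right hge]
          simp
        simp [hel]
    · -- ret_pos
      rw [hkd, List.range'_succ]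
      simp
    · -- ret_labels
      have step : (ls.take (min ls.length ss.length)).drop j
          = ls[j] :: (ls.take (min ls.length ss.length)).drop (j+1) := by
        rw [List.drop_eq_getElem_cons (by simpa [List.length_take] using hj)]
        simp [List.getElem_take]
      simp [step]

-- A's outer loop equals B's fold from any starting accumulator.
lemma pvOuterA_eq_foldl :
    ∀ (l : List (List String × List String))
      (st : List String × List String × List String × List Int × List String),
      pvOuterA l st =
        l.foldl
          (fun st p =>
            let ls := p.1
            let ss := p.2
            let k := min ls.length ss.length
            (st.1 ++ ss.take k,
             st.2.1 ++ ("" :: ss.dropLast).take k,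
             st.2.2.1 ++ (ss.drop 1 ++ [""]).take k,
             st.2.2.2.1 ++ (List.range k).map (fun j => (j : Int)),
             st.2.2.2.2 ++ ls.take k)) st := by
  intro l
  induction l with
  | nil => intro st; rfl
  | cons p rest ih =>
    intro st
    obtain ⟨ls, ss⟩ := p
    rw [pvOuterA, List.foldl_cons, ih]
    congr 1
    have h := pvInnerA_eq ls ss (min ls.length ss.length) 0 st (by omega)
    simpa [List.range_eq_range', List.drop_one] using h

-- ===== VERDICT (by name: the statement is the Claim_ definition above) =====
theorem abstracts_to_sentences_spec : Claim_equal_abstracts_to_sentences := by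
  intro abstracts labels _
  show abstracts_to_sentences abstracts labels = abstracts_to_sentences_alt abstracts labels
  unfold abstracts_to_sentences abstracts_to_sentences_alt
  exact pvOuterA_eq_foldl _ _
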